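-- pv_equiv track=rewrite | github.com/AmruthSrivatsan/Dynamic-Ensembling-using-LLMs | DER4.py | normalize_yes_no
-- ===== SOURCE A (Python) =====
-- def normalize_yes_no(text: str) -> str:
--     """
--     Force any model output into EXACTLY "yes" or "no".
--     This ensures evaluation is deterministic for BoolQ.
--     """
--     t = (text or "").strip().lower()
--     t = t.replace(".", " ").replace(",", " ").replace("!", " ").replace("?", " ").strip()
--     toks = t.split()
--     if not toks:
--         return "no"
--     last_yes = max([i for i, w in enumerate(toks) if w == "yes"], default=-1)
--     last_no = max([i for i, w in enumerate(toks) if w == "no"], default=-1)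
--     if last_yes == -1 and last_no == -1:
--         return "yes" if t.startswith("yes") else "no"
--     return "yes" if last_yes > last_no else "no"
-- ===== SOURCE B (Python) =====
-- def normalize_yes_no(text: str) -> str:
--     """
--     Force any model output into EXACTLY "yes" or "no".
--     Single short-circuiting backward scan instead of two full index scans.
--     """
--     t = (text or "").strip().lower()
--     t = t.replace(".", " ").replace(",", " ").replace("!", " ").replace("?", " ").strip()
--     toks = t.split()
--     if not toks:
--         return "no"
--     for w in reversed(toks):
--         if w == "yes":
--             return "yes"
--         if w == "no":
--             return "no"
--     return "yes" if t.startswith("yes") else "no"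
-- ===== Notes on version B (the rewrite author's own statement) =====
-- stated objective: simpler
-- what changed: Replaces the two full enumerate-comprehension index scans plus max comparison with a single short-circuiting scan over reversed(toks) that returns on the first 'yes'/'no' marker found.
import Mathlib
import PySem

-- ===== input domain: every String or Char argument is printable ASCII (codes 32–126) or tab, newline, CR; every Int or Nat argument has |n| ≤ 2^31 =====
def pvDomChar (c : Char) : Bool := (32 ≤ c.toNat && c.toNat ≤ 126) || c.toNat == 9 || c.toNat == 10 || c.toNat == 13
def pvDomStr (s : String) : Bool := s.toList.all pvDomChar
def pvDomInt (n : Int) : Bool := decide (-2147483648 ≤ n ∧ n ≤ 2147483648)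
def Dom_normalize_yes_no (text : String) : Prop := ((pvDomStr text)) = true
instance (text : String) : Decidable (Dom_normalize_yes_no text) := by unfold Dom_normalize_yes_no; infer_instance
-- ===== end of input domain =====

-- B replaces A's two enumerate-index scans + max comparison by one short-circuiting backward scan (objective: simpler).

-- ===== PORT A =====
def normalize_yes_no (text : String) : String :=
  let t := PySem.Str.lower (PySem.Str.strip text)
  let t := PySem.Str.strip
    (PySem.Str.replace (PySem.Str.replace (PySem.Str.replace (PySem.Str.replace t "." " ") "," " ") "!" " ") "?" " ")
  let toks := PySem.Str.split₀ t
  if toks = [] then "no"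
  else
    let last_yes : Int :=
      (PySem.List.max? (((PySem.List.enumerate toks).filter (fun p => p.2 == "yes")).map (fun p => p.1)) (fun x => x)).getD (-1)
    let last_no : Int :=
      (PySem.List.max? (((PySem.List.enumerate toks).filter (fun p => p.2 == "no")).map (fun p => p.1)) (fun x => x)).getD (-1)
    if last_yes = -1 ∧ last_no = -1 then
      if PySem.Str.startswith t "yes" then "yes" else "no"
    else
      if last_yes > last_no then "yes" else "no"

-- ===== PORT B =====
-- the reversed(toks) loop of Source B: first token equal to "yes"/"no", none if the loop falls through
def pvRevScan : List String → Option String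
  | [] => none
  | w :: rest => if w == "yes" then some "yes" else if w == "no" then some "no" else pvRevScan rest

def normalize_yes_no_alt (text : String) : String :=
  let t := PySem.Str.lower (PySem.Str.strip text)
  let t := PySem.Str.strip
    (PySem.Str.replace (PySem.Str.replace (PySem.Str.replace (PySem.Str.replace t "." " ") "," " ") "!" " ") "?" " ")
  let toks := PySem.Str.split₀ t
  if toks = [] then "no"
  else
    match pvRevScan toks.reverse with
    | some r => r
    | none => if PySem.Str.startswith t "yes" then "yes" else "no"

-- ===== PRECONDITION & SPEC =====
def Spec_normalize_yes_no (text : String) (out : String) : Prop := out = normalize_yes_no_alt text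
instance (text : String) (out : String) : Decidable (Spec_normalize_yes_no text out) := by unfold Spec_normalize_yes_no; infer_instance

-- ===== CLAIM (what is proved, stated in full; the proofs are below) =====
def Claim_equal_normalize_yes_no : Prop := ∀ (text : String), Dom_normalize_yes_no text → Spec_normalize_yes_no text (normalize_yes_no text)

-- ===== LEMMAS AND PROOFS =====

-- A's "last index of w in toks" expression, named for the proofs
def pvLastIdx (toks : List String) (w : String) : Int :=
  (PySem.List.max? (((PySem.List.enumerate toks).filter (fun p => p.2 == w)).map (fun p => p.1)) (fun x => x)).getD (-1)

theorem pvLastIdx_nil (w : String) : pvLastIdx [] w = -1 := by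
  simp [pvLastIdx, PySem.List.enumerate, PySem.List.max?]

-- any index produced by A's comprehension is a valid position of toks
theorem pvMem_bounds (toks : List String) (w : String) (m : Int)
    (hm : m ∈ ((PySem.List.enumerate toks).filter (fun p => p.2 == w)).map (fun p => p.1)) :
    0 ≤ m ∧ m < (toks.length : Int) := by
  obtain ⟨p, hp, rfl⟩ := List.mem_map.mp hm
  have hp' := (List.mem_filter.mp hp).1
  obtain ⟨k, hk, rfl⟩ := (PySem.List.mem_enumerate_iff _ _ _).mp hp'
  exact ⟨by simp, by simp; omega⟩

theorem pvLastIdx_lt (toks : List String) (w : String) :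
    pvLastIdx toks w < (toks.length : Int) := by
  unfold pvLastIdx
  cases h : PySem.List.max? (((PySem.List.enumerate toks).filter (fun p => p.2 == w)).map (fun p => p.1)) (fun x => x) with
  | none => simp; omega
  | some m =>
    have := pvMem_bounds toks w m (PySem.List.max?_mem h)
    simpa using this.2

theorem pvLastIdx_append_self (xs : List String) (x : String) :
    pvLastIdx (xs ++ [x]) x = (xs.length : Int) := by
  unfold pvLastIdx
  rw [PySem.List.enumerate_append, List.filter_append, List.map_append]
  simp only [PySem.List.enumerate_cons, PySem.List.enumerate_nil, List.filter_cons,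
    beq_self_eq_true, if_pos, List.filter_nil, List.map_cons, List.map_nil]
  set L := ((PySem.List.enumerate xs).filter (fun p => p.2 == x)).map (fun p => p.1) with hL
  have hne : L ++ [(0 + (xs.length : Int))] ≠ [] := by simp
  cases h : PySem.List.max? (L ++ [0 + (xs.length : Int)]) (fun x => x) with
  | none => exact absurd ((PySem.List.max?_eq_none_iff _ _).mp h) hne
  | some m =>
    have hmem := PySem.List.max?_mem h
    have hmax := PySem.List.max?_isMax h (0 + (xs.length : Int)) (by simp)
    rcases List.mem_append.mp hmem with hL' | hx
    · have := pvMem_bounds xs x m hL'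
      simp at hmax
      omega
    · simp at hx ⊢
      omega

theorem pvLastIdx_append_other (xs : List String) (x w : String) (hxw : (x == w) = false) :
    pvLastIdx (xs ++ [x]) w = pvLastIdx xs w := by
  unfold pvLastIdx
  rw [PySem.List.enumerate_append, List.filter_append]
  simp [PySem.List.enumerate_cons, PySem.List.enumerate_nil, hxw]

-- the key correspondence: the backward scan computes A's max comparison
theorem pvRevScan_eq (toks : List String) :
    pvRevScan toks.reverse =
      (if pvLastIdx toks "yes" = -1 ∧ pvLastIdx toks "no" = -1 then none
       else some (if pvLastIdx toks "yes" > pvLastIdx toks "no" then "yes" else "no")) := by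
  induction toks using List.reverseRecOn with
  | nil => simp [pvRevScan, pvLastIdx_nil]
  | append_singleton xs x ih =>
    rw [List.reverse_append]
    simp only [List.reverse_cons, List.reverse_nil, List.nil_append, List.singleton_append]
    by_cases hy : x = "yes"
    · subst hy
      have h1 := pvLastIdx_append_self xs "yes"
      have h2 := pvLastIdx_append_other xs "yes" "no" (by decide)
      have h3 := pvLastIdx_lt xs "no"
      simp only [pvRevScan, beq_self_eq_true, if_pos, h1, h2]
      rw [if_neg (by omega), if_pos (by omega)]
    · by_cases hn : x = "no"
      · subst hn
        have h1 := pvLastIdx_append_self xs "no"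
        have h2 := pvLastIdx_append_other xs "no" "yes" (by decide)
        have h3 := pvLastIdx_lt xs "yes"
        simp only [pvRevScan, beq_self_eq_true, if_pos]
        rw [if_neg (by decide), h1, h2]
        rw [if_neg (by omega), if_neg (by omega)]
      · have h1 := pvLastIdx_append_other xs x "yes" (by simpa using hy)
        have h2 := pvLastIdx_append_other xs x "no" (by simpa using hn)
        simp only [pvRevScan, beq_iff_eq, hy, hn, if_false, h1, h2, ih]

-- ===== VERDICT (by name: the statement is the Claim_ definition above) =====
theorem normalize_yes_no_spec : Claim_equal_normalize_yes_no := by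
  intro text _
  unfold Spec_normalize_yes_no normalize_yes_no normalize_yes_no_alt
  simp only
  generalize (PySem.Str.strip
    (PySem.Str.replace (PySem.Str.replace (PySem.Str.replace (PySem.Str.replace
      (PySem.Str.lower (PySem.Str.strip text)) "." " ") "," " ") "!" " ") "?" " ")) = t
  generalize PySem.Str.split₀ t = toks
  by_cases h : toks = []
  · simp [h]
  · have key := pvRevScan_eq toks
    simp only [pvLastIdx] at key
    simp only [h, if_false, key]
    split_ifs with h1 h2 <;> simp_all
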